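-- pv_equiv track=rewrite | github.com/MrBrantCode/unitest_baseline | mut_generate/mist_train_cf/cf_7045/solution.py | create_random_string
-- ===== SOURCE A (Python) =====
-- def create_random_string(input_string):
--     new_string = ""
--     index = 0
--     length = len(input_string)
--
--     while len(new_string) < 10:
--         index = (index + 1) % length
--         new_string += input_string[index]
--
--     return new_string
-- ===== SOURCE B (Python) =====
-- def create_random_string(input_string):
--     rotated = input_string[1:] + input_string[:1]
--     k = -(-10 // len(input_string))  # ceil(10 / len); empty input raises ZeroDivisionError like A
--     return (rotated * k)[:10]
-- ===== Notes on version B (the rewrite author's own statement) =====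
-- stated objective: faster
-- what changed: Replaces the 10-iteration append-one-character loop with a closed form: one-char left rotation via slicing, ceil-division repeat count, string repetition and a single [:10] slice.
-- outside the precondition, e.g. on create_random_string(''): A raises ZeroDivisionError, B raises ZeroDivisionError
import Mathlib
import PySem

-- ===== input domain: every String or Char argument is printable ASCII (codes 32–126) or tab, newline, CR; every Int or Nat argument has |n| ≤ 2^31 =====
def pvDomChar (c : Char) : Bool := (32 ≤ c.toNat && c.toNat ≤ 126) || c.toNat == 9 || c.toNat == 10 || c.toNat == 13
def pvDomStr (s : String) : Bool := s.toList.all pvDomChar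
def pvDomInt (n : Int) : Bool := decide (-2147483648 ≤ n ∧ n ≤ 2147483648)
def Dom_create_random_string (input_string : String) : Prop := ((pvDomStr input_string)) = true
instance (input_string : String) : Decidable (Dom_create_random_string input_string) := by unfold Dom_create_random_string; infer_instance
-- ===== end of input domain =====

-- B replaces A's 10-step append-one-character loop by a closed form (rotate via slicing,
-- ceil-division repeat count, repetition, one [:10] slice); objective: faster (constant-factor).

-- ===== PORT A =====
-- while len(new_string) < 10: index = (index+1) % length; new_string += input_string[index]
def pvLoopA (s : List Char) (length : Int) (index : Int) (new_string : List Char) : List Char :=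
  if _h : new_string.length < 10 then
    let index' := PySem.Int.mod (index + 1) length
    match PySem.List.pyGet? s index' with
    | some c => pvLoopA s length index' (new_string ++ [c])
    | none => new_string   -- Python raises IndexError/ZeroDivisionError here; unreachable under Pre_
  else new_string
termination_by 10 - new_string.length
decreasing_by simp; omega

def create_random_string (input_string : String) : String :=
  String.mk (pvLoopA input_string.toList (input_string.toList.length : Int) 0 [])

-- ===== PORT B =====
def create_random_string_alt (input_string : String) : String :=
  let s := input_string.toList
  let rotated := PySem.List.slice s (some 1) none ++ PySem.List.slice s none (some 1)  -- s[1:] + s[:1]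
  let k : Int := -(PySem.Int.floordiv (-10) (s.length : Int))  -- -(-10 // len(s))
  String.mk (PySem.List.slice (PySem.List.pyRepeat rotated k) none (some 10))  -- (rotated*k)[:10]

-- ===== PRECONDITION & SPEC =====
-- On the empty string both pythons raise ZeroDivisionError; excluded.
def Pre_create_random_string (input_string : String) : Prop := input_string ≠ ""
instance (input_string : String) : Decidable (Pre_create_random_string input_string) := by unfold Pre_create_random_string; infer_instance
def pvWitness_create_random_string : String := "ab"
def Spec_create_random_string (input_string : String) (out : String) : Prop := out = create_random_string_alt input_string
instance (input_string : String) (out : String) : Decidable (Spec_create_random_string input_string out) := by unfold Spec_create_random_string; infer_instance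

-- ===== CLAIM (what is proved, stated in full; the proofs are below) =====
def Claim_equal_create_random_string : Prop := ∀ (input_string : String), Dom_create_random_string input_string → Pre_create_random_string input_string → Spec_create_random_string input_string (create_random_string input_string)

-- ===== LEMMAS AND PROOFS =====

-- the common characterization of both programs: character i of the result is s[(i+1) % len]
lemma pvMod_shift (m len : Nat) : (m % len + 1) % len = (m + 1) % len :=
  (Nat.mod_modEq m len).add_right 1

lemma pvLoopA_spec (s : List Char) (hlen : 0 < s.length) :
    ∀ (fuel m : Nat) (acc : List Char), acc.length + fuel = 10 →
      pvLoopA s (s.length : Int) ((m % s.length : Nat) : Int) acc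
        = acc ++ (List.range fuel).map (fun i => s.getD ((m + 1 + i) % s.length) ' ') := by
  intro fuel
  induction fuel with
  | zero =>
    intro m acc hacc
    unfold pvLoopA
    simp [show ¬ acc.length < 10 by omega]
  | succ n ih =>
    intro m acc hacc
    unfold pvLoopA
    have hlt : acc.length < 10 := by omega
    rw [dif_pos hlt]
    have hidx : PySem.Int.mod (((m % s.length : Nat) : Int) + 1) (s.length : Int)
        = (((m + 1) % s.length : Nat) : Int) := by
      rw [PySem.Int.mod_eq_emod_of_pos (by exact_mod_cast hlen)]
      have h1 : ((m % s.length : Nat) : Int) + 1 = ((m % s.length + 1 : Nat) : Int) := by push_cast; ring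
      rw [h1, ← Int.natCast_mod, pvMod_shift]
    simp only [hidx, PySem.List.pyGet?_natCast,
      List.getElem?_eq_getElem (Nat.mod_lt _ hlen)]
    have ihh := ih (m + 1) (acc ++ [s[(m + 1) % s.length]'(Nat.mod_lt _ hlen)]) (by simp; omega)
    simp only [ihh, List.append_assoc, List.range_succ_eq_map, List.map_cons, List.map_map]
    congr 1
    simp only [List.singleton_append]
    congr 1
    · exact (List.getD_eq_getElem s ' ' (Nat.mod_lt _ hlen)).symm
    · apply List.map_congr_left
      intro i _
      simp only [Function.comp]
      congr 2
      omega

lemma pvRot_getD (s : List Char) (hlen : 0 < s.length) (j : Nat) (hj : j < s.length) :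
    (s.drop 1 ++ s.take 1).getD j ' ' = s.getD ((j + 1) % s.length) ' ' := by
  have hd : (s.drop 1).length = s.length - 1 := by simp
  by_cases h : j < s.length - 1
  · rw [List.getD_append _ _ _ _ (by rw [hd]; omega)]
    have h1 : j + 1 < s.length := by omega
    rw [Nat.mod_eq_of_lt h1]
    rw [List.getD_eq_getElem _ _ (by rw [hd]; omega), List.getD_eq_getElem _ _ h1]
    simp
  · -- j = s.length - 1 : wraps around to s[0]
    have hj0 : j = s.length - 1 := by omega
    have hz : (j + 1) % s.length = 0 := by
      have : j + 1 = s.length := by omega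
      simp [this]
    rw [hz, List.getD_append_right _ _ _ _ (by rw [hd]; omega), hd, hj0]
    have h0 : s.length - 1 - (s.length - 1) = 0 := by omega
    rw [h0]
    cases s with
    | nil => simp at hlen
    | cons a t => simp

lemma pvRep_getD (xs : List Char) : ∀ (k : Nat) (i : Nat), i < k * xs.length →
    (List.replicate k xs).flatten.getD i ' ' = xs.getD (i % xs.length) ' ' := by
  intro k
  induction k with
  | zero => intro i hi; simp at hi
  | succ n ih =>
    intro i hi
    have hlen : 0 < xs.length := by by_contra h; simp at h; simp [h] at hi
    rw [List.replicate_succ, List.flatten_cons]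
    by_cases h : i < xs.length
    · rw [List.getD_append _ _ _ _ h, Nat.mod_eq_of_lt h]
    · have hge : xs.length ≤ i := by omega
      rw [List.getD_append_right _ _ _ _ hge]
      rw [ih (i - xs.length) (by
        have : (n + 1) * xs.length = xs.length + n * xs.length := by ring
        omega)]
      congr 1
      conv_rhs => rw [show i = xs.length + (i - xs.length) by omega]
      rw [Nat.add_mod_left]

theorem create_random_string_spec : Claim_equal_create_random_string := by
  unfold Claim_equal_create_random_string
  intro input_string _hdom hpre
  unfold Spec_create_random_string create_random_string create_random_string_alt
  simp only [PySem.List.slice_from _ (by norm_num : (0:Int) ≤ 1),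
    PySem.List.slice_to _ (by norm_num : (0:Int) ≤ 1),
    PySem.List.slice_to _ (by norm_num : (0:Int) ≤ 10),
    Int.toNat_one, (show ((10:Int)).toNat = 10 from rfl)]
  set s := input_string.toList with hs
  have hne : s ≠ [] := fun hnil => hpre (String.toList_eq_nil_iff.mp (hs.symm.trans hnil))
  have hlen : 0 < s.length := List.length_pos_of_ne_nil hne
  -- A side: 10 characters, i-th is s[(i+1) % len]
  have hA := pvLoopA_spec s hlen 10 0 [] (by simp)
  simp only [Nat.zero_mod, Nat.cast_zero, List.nil_append, Nat.zero_add] at hA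
  rw [hA]
  -- B side
  set rotated := s.drop 1 ++ s.take 1 with hrot
  have hrotlen : rotated.length = s.length := by
    rw [hrot]; simp; omega
  set k : Int := -(PySem.Int.floordiv (-10) (s.length : Int)) with hk
  have hkc : (k - 1) * (s.length : Int) < 10 ∧ (10:Int) ≤ k * (s.length : Int) :=
    (PySem.Int.neg_floordiv_neg_eq_iff_of_pos (by exact_mod_cast hlen)).mp hk.symm
  have hkpos : 0 < k := by
    rcases hkc with ⟨_, h2⟩
    by_contra h
    have h' : k ≤ 0 := by omega
    have : k * (s.length : Int) ≤ 0 := mul_nonpos_of_nonpos_of_nonneg h' (by positivity)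
    omega
  have hknat : 10 ≤ k.toNat * s.length := by
    rcases hkc with ⟨_, h2⟩
    have : (10:Int) ≤ ((k.toNat * s.length : Nat) : Int) := by
      push_cast
      rw [Int.toNat_of_nonneg (le_of_lt hkpos)]
      exact h2
    exact_mod_cast this
  simp only [PySem.List.pyRepeat]
  have hflat : (List.replicate k.toNat rotated).flatten.length = k.toNat * rotated.length := by
    simp [List.map_replicate, smul_eq_mul]
  congr 1
  apply List.ext_getElem
  · simp only [List.length_map, List.length_range, List.length_take, hflat, hrotlen]
    omega
  · intro i h1 h2
    have hi10 : i < 10 := by simpa using h1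
    have hiflat : i < (List.replicate k.toNat rotated).flatten.length := by
      rw [hflat, hrotlen]; omega
    rw [List.getElem_map, List.getElem_range, List.getElem_take]
    rw [← List.getD_eq_getElem _ ' ' hiflat]
    rw [pvRep_getD rotated k.toNat i (by rw [hrotlen]; omega)]
    rw [hrotlen, hrot, pvRot_getD s hlen (i % s.length) (Nat.mod_lt _ hlen)]
    rw [pvMod_shift]
    have he : (0:Nat) + 1 + i = i + 1 := by omega
    rw [he]
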